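-- pv_equiv track=rewrite | github.com/porfanid/BigData | 2ο Φυλλάδιο Ασκήσεων/Ενότητα Α Υπολογισμός Heavy Hitters σε ροές δεδομένων/Άσκηση 1 Η περίπτωση των εισαγωγών στοιχείων/heavy_hitters.py | find_point_one_percent_hitters
-- ===== SOURCE A (Python) =====
-- def find_point_one_percent_hitters(stream):
--     k = 999  # Για να εντοπιστούν όλα τα στοιχεία με f ≥ 0.1%
--     L = {}
--
--     for x in stream:
--         if x in L:
--             L[x] += 1
--         elif len(L) < k:
--             L[x] = 1
--         else:
--             to_delete = []
--             for item in L: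
--                 L[item] -= 1
--                 if L[item] == 0:
--                     to_delete.append(item)
--             for item in to_delete:
--                 del L[item]
--
--     return L
-- ===== SOURCE B (Python) =====
-- def find_point_one_percent_hitters(stream):
--     k = 999  # threshold parameter for 0.1% heavy hitters
--     counts = {}    # x -> true count + offset (lazy global decrement)
--     buckets = {}   # stored value -> set of keys currently stored at exactly that value
--     offset = 0
--     for x in stream:
--         if x in counts:
--             v = counts[x]
--             buckets[v].discard(x)
--             counts[x] = v + 1
--             buckets.setdefault(v + 1, set()).add(x)
--         elif len(counts) < k:
--             counts[x] = offset + 1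
--             buckets.setdefault(offset + 1, set()).add(x)
--         else:
--             # global decrement = bump the offset; only the counters that thereby
--             # reach zero are touched, found in O(1) via the value bucket
--             offset += 1
--             for y in buckets.pop(offset, ()):
--                 del counts[y]
--     return {key: v - offset for key, v in counts.items()}
-- ===== Notes on version B (the rewrite author's own statement) =====
-- stated objective: alternative
-- what changed: B replaces A's eviction step (walk all 999 counters, decrement each, collect and delete zeros) by an event-driven scheme: counters store count+offset and B maintains an inverted value-bucket index (stored value -> set of keys), so an eviction is an offset bump plus deletion of exactly the keys in the one bucket that reaches zero, never scanning the other counters.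
import Mathlib
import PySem

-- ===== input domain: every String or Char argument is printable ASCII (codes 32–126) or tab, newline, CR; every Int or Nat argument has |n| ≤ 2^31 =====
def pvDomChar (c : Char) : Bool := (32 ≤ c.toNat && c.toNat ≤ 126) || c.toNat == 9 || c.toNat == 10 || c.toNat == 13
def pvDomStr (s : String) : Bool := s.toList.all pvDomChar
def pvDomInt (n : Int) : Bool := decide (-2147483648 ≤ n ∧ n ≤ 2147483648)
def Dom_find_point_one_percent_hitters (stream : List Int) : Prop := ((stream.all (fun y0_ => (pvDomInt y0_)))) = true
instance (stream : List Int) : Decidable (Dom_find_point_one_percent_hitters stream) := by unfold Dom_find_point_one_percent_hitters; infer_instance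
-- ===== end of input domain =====

-- B replaces A's eviction (decrement all 999 counters, collect zeros, delete them) by an
-- event-driven scheme: counters store count+offset and an inverted value-bucket index
-- (stored value -> set of keys) lets an eviction delete exactly the keys of the one bucket
-- that reaches zero; alternative data structure, same amortized cost.

-- ===== PORT A =====
-- the body of the inner 'for item in L' loop: L[item] -= 1; if L[item] == 0: to_delete.append(item)
def pvDecStep (st : PySem.Dict Int Int × List Int) (item : Int) : PySem.Dict Int Int × List Int :=
  let d := st.1.modify item 0 (· - 1)
  if d.getD item 0 == 0 then (d, st.2 ++ [item]) else (d, st.2)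

-- the body of A's 'for x in stream' loop (the inner 'for item in L' decrement loop and
-- the 'for item in to_delete' deletion loop are the two inner foldls)
def pvStepA (L : PySem.Dict Int Int) (x : Int) : PySem.Dict Int Int :=
  if L.contains x then
    L.modify x 0 (· + 1)                                   -- L[x] += 1
  else if (L.size : Int) < 999 then
    L.insert x 1                                           -- L[x] = 1
  else
    let st := L.keys.foldl pvDecStep (L, ([] : List Int))
    st.2.foldl (fun d item => d.erase item) st.1           -- del L[item]

def find_point_one_percent_hitters (stream : List Int) : List (Int × Int) :=
  (stream.foldl pvStepA PySem.Dict.empty).items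

-- ===== PORT B =====
-- B's loop state: (counts, buckets, offset); counts[x] = true count + offset,
-- buckets[v] = set of keys whose stored value is exactly v.
-- 'buckets[v].discard(x)' is ported as modify with default Set.empty: on every state the loop
-- reaches, buckets[v] exists (x is in it), so this is exact there.
-- The 'for y in buckets.pop(offset, ())' deletion loop folds over the set's element list; its
-- iteration order cannot affect the resulting dict (erasures only remove entries).
def pvStepB (st : PySem.Dict Int Int × PySem.Dict Int (PySem.Set Int) × Int) (x : Int) :
    PySem.Dict Int Int × PySem.Dict Int (PySem.Set Int) × Int :=
  let counts := st.1
  let buckets := st.2.1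
  let offset := st.2.2
  if counts.contains x then
    let v := counts.getD x 0                               -- v = counts[x]
    let buckets1 := buckets.modify v PySem.Set.empty (fun s => PySem.Set.discard s x)
    (counts.insert x (v + 1),                              -- counts[x] = v + 1
     buckets1.modify (v + 1) PySem.Set.empty (fun s => PySem.Set.add s x),  -- setdefault(v+1,set()).add(x)
     offset)
  else if (counts.size : Int) < 999 then
    (counts.insert x (offset + 1),                         -- counts[x] = offset + 1
     buckets.modify (offset + 1) PySem.Set.empty (fun s => PySem.Set.add s x),
     offset)
  else
    let offset' := offset + 1
    let dying := buckets.getD offset' PySem.Set.empty      -- buckets.pop(offset, ())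
    (dying.foldl (fun d y => d.erase y) counts,            -- del counts[y]
     buckets.erase offset',
     offset')

def find_point_one_percent_hitters_alt (stream : List Int) : List (Int × Int) :=
  let st := stream.foldl pvStepB (PySem.Dict.empty, PySem.Dict.empty, 0)
  -- {key: v - offset for key, v in counts.items()}
  st.1.items.map (fun p => (p.1, p.2 - st.2.2))

-- ===== PRECONDITION & SPEC =====
def Spec_find_point_one_percent_hitters (stream : List Int) (out : List (Int × Int)) : Prop := out = find_point_one_percent_hitters_alt stream
instance (stream : List Int) (out : List (Int × Int)) : Decidable (Spec_find_point_one_percent_hitters stream out) := by unfold Spec_find_point_one_percent_hitters; infer_instance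

-- ===== CLAIM (what is proved, stated in full; the proofs are below) =====
def Claim_equal_find_point_one_percent_hitters : Prop := ∀ (stream : List Int), Dom_find_point_one_percent_hitters stream → Spec_find_point_one_percent_hitters stream (find_point_one_percent_hitters stream)

-- ===== LEMMAS AND PROOFS =====

-- value shift applied to an items list
def pvMapOff (off : Int) (l : List (Int × Int)) : List (Int × Int) :=
  l.map (fun p => (p.1, p.2 - off))

-- one decrement of every value
def pvDec1 (l : List (Int × Int)) : List (Int × Int) :=
  l.map (fun p => (p.1, p.2 - 1))

-- the invariant of B's state: counts has unique keys, every stored value is above the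
-- offset, and buckets indexes counts exactly (for values above the offset)
def pvInv (counts : PySem.Dict Int Int) (buckets : PySem.Dict Int (PySem.Set Int)) (offset : Int) : Prop :=
  counts.keys.Nodup ∧
  (∀ x v, counts.get? x = some v → offset < v) ∧
  (∀ v, offset < v → ∀ y, y ∈ buckets.getD v PySem.Set.empty ↔ counts.get? y = some v)

lemma pv_find?_mapOff (off : Int) (l : List (Int × Int)) (x : Int) :
    (pvMapOff off l).find? (fun p => p.1 == x)
      = (l.find? (fun p => p.1 == x)).map (fun p => (p.1, p.2 - off)) := by
  induction l with
  | nil => rfl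
  | cons h t ih =>
      by_cases hk : h.1 = x
      · simp [pvMapOff, List.find?, hk]
      · simp only [pvMapOff, List.map_cons, List.find?] at *
        simp only [show (h.1 == x) = false by simp [hk]]
        exact ih

lemma pv_contains_mapOff (off : Int) (l : List (Int × Int)) (x : Int) :
    (PySem.Dict.mk (pvMapOff off l)).contains x = (PySem.Dict.mk l).contains x := by
  simp [PySem.Dict.contains, pvMapOff, List.any_map, Function.comp_def]

lemma pv_size_mapOff (off : Int) (l : List (Int × Int)) :
    (PySem.Dict.mk (pvMapOff off l)).size = (PySem.Dict.mk l).size := by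
  simp [PySem.Dict.size, pvMapOff]

lemma pv_get?_mapOff (off : Int) (l : List (Int × Int)) (x : Int) :
    (PySem.Dict.mk (pvMapOff off l)).get? x
      = ((PySem.Dict.mk l).get? x).map (fun v => v - off) := by
  simp [PySem.Dict.get?, pv_find?_mapOff, Option.map_map, Function.comp_def]

-- modify (+1) commutes with the value shift
lemma pv_modify_mapOff (off : Int) (l : List (Int × Int)) (x : Int)
    (hc : (PySem.Dict.mk l).contains x = true) :
    (PySem.Dict.mk (pvMapOff off l)).modify x 0 (· + 1)
      = PySem.Dict.mk (pvMapOff off (((PySem.Dict.mk l).modify x 0 (· + 1)).items)) := by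
  obtain ⟨v, hg⟩ : ∃ v, (PySem.Dict.mk l).get? x = some v := by
    rw [PySem.Dict.contains_eq_isSome_get?] at hc
    exact Option.isSome_iff_exists.mp hc
  have hgm : (PySem.Dict.mk (pvMapOff off l)).get? x = some (v - off) := by
    rw [pv_get?_mapOff, hg]; rfl
  have hc' : (PySem.Dict.mk (pvMapOff off l)).contains x = true := by
    rw [pv_contains_mapOff]; exact hc
  simp only [PySem.Dict.modify, PySem.Dict.insert, hc', hc, if_true,
    PySem.Dict.getD_eq_get?_getD, hg, hgm, Option.getD_some]
  simp only [pvMapOff, List.map_map]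
  congr 1
  apply List.map_congr_left
  intro p _
  by_cases hk : p.1 = x
  · simp [hk]; ring
  · simp [hk]

-- insert of a fresh key commutes with the value shift
lemma pv_insert_mapOff (off : Int) (l : List (Int × Int)) (x : Int)
    (hc : (PySem.Dict.mk l).contains x = false) :
    (PySem.Dict.mk (pvMapOff off l)).insert x 1
      = PySem.Dict.mk (pvMapOff off (((PySem.Dict.mk l).insert x (off + 1)).items)) := by
  have hc' : (PySem.Dict.mk (pvMapOff off l)).contains x = false := by
    rw [pv_contains_mapOff]; exact hc
  simp only [PySem.Dict.insert, hc, hc', Bool.false_eq_true, if_false]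
  simp [pvMapOff]

-- a map that replaces entries keyed k is the identity when no entry has key k
lemma pv_replace_absent (l : List (Int × Int)) (k : Int) (w : Int)
    (h : ∀ p ∈ l, p.1 ≠ k) :
    l.map (fun p => if p.1 == k then (k, w) else p) = l := by
  rw [List.map_congr_left (g := id) ?_, List.map_id]
  intro p hp; simp [h p hp]

-- find? skips a prefix that does not carry the key
lemma pv_find?_append_absent (l1 l2 : List (Int × Int)) (k : Int)
    (h : ∀ p ∈ l1, p.1 ≠ k) :
    (l1 ++ l2).find? (fun p => p.1 == k) = l2.find? (fun p => p.1 == k) := by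
  induction l1 with
  | nil => rfl
  | cons a t ih =>
      have ha : (a.1 == k) = false := by simp [h a (by simp)]
      simp only [List.cons_append, List.find?, ha]
      exact ih (fun p hp => h p (by simp [hp]))

-- getD of a bucket dict is unchanged by erasing another key
lemma pv_get?_filter_ne (l : List (Int × PySem.Set Int)) (k k' : Int) (h : k' ≠ k) :
    (PySem.Dict.mk (l.filter (fun p => !(p.1 == k)))).get? k' = (PySem.Dict.mk l).get? k' := by
  induction l with
  | nil => rfl
  | cons a t ih =>
      obtain ⟨ak, av⟩ := a
      rw [List.filter_cons]
      by_cases hak : ak = k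
      · rw [if_neg (by simp [hak])]
        rw [ih, PySem.Dict.get?_mk_cons]
        rw [if_neg (by simp [hak, Ne.symm h])]
      · rw [if_pos (by simp [hak])]
        rw [PySem.Dict.get?_mk_cons, PySem.Dict.get?_mk_cons, ih]

lemma pv_getD_erase_of_ne (d : PySem.Dict Int (PySem.Set Int)) (k k' : Int) (h : k' ≠ k) :
    (d.erase k).getD k' PySem.Set.empty = d.getD k' PySem.Set.empty := by
  obtain ⟨l⟩ := d
  simp only [PySem.Dict.erase, PySem.Dict.getD_eq_get?_getD]
  rw [pv_get?_filter_ne l k k' h]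

-- A's decrement loop, characterised: pre is the already-processed prefix
lemma pv_decLoop (post pre : List (Int × Int)) (td : List Int)
    (h : (((pre ++ post).map Prod.fst)).Nodup) :
    (post.map Prod.fst).foldl pvDecStep (PySem.Dict.mk (pvDec1 pre ++ post), td)
      = (PySem.Dict.mk (pvDec1 (pre ++ post)),
         td ++ (post.filter (fun p => p.2 == 1)).map Prod.fst) := by
  induction post generalizing pre td with
  | nil => simp
  | cons q rest ih =>
      obtain ⟨k, v⟩ := q
      have h1 : ((pre.map Prod.fst) ++ k :: rest.map Prod.fst).Nodup := by simpa using h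
      obtain ⟨hnpre, hnkr, hdisj⟩ := List.nodup_append.mp h1
      have hkpre : ∀ p ∈ pre, p.1 ≠ k := by
        intro p hp
        exact hdisj p.1 (List.mem_map_of_mem hp) k (by simp)
      have hkrest : ∀ p ∈ rest, p.1 ≠ k := by
        intro p hp he
        have := (List.nodup_cons.mp hnkr).1
        exact this (he ▸ List.mem_map_of_mem hp)
      have hd1 : ∀ p ∈ pvDec1 pre, p.1 ≠ k := by
        intro p hp
        obtain ⟨q, hq, rfl⟩ := List.mem_map.mp hp
        exact hkpre q hq
      have hget : (PySem.Dict.mk (pvDec1 pre ++ (k, v) :: rest)).get? k = some v := by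
        simp only [PySem.Dict.get?]
        rw [pv_find?_append_absent _ _ _ hd1]
        simp [List.find?]
      have hcont : (PySem.Dict.mk (pvDec1 pre ++ (k, v) :: rest)).contains k = true := by
        rw [PySem.Dict.contains_eq_isSome_get?, hget]; rfl
      have hmod : (PySem.Dict.mk (pvDec1 pre ++ (k, v) :: rest)).modify k 0 (· - 1)
          = PySem.Dict.mk (pvDec1 pre ++ (k, v - 1) :: rest) := by
        simp only [PySem.Dict.modify, PySem.Dict.getD_eq_get?_getD, hget, Option.getD_some,
          PySem.Dict.insert, hcont, if_true]
        congr 1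
        rw [List.map_append, pv_replace_absent _ _ _ hd1, List.map_cons,
          pv_replace_absent _ _ _ hkrest]
        simp
      have hget2 : (PySem.Dict.mk (pvDec1 pre ++ (k, v - 1) :: rest)).getD k 0 = v - 1 := by
        simp only [PySem.Dict.getD_eq_get?_getD, PySem.Dict.get?]
        rw [pv_find?_append_absent _ _ _ hd1]
        simp [List.find?]
      have hshape : pvDec1 pre ++ (k, v - 1) :: rest = pvDec1 (pre ++ [(k, v)]) ++ rest := by
        simp [pvDec1]
      have hnod' : (((pre ++ [(k, v)]) ++ rest).map Prod.fst).Nodup := by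
        simpa [List.append_assoc] using h
      by_cases hv : v = 1
      · have hstep : pvDecStep (PySem.Dict.mk (pvDec1 pre ++ (k, v) :: rest), td) k
            = (PySem.Dict.mk (pvDec1 (pre ++ [(k, v)]) ++ rest), td ++ [k]) := by
          unfold pvDecStep
          rw [hmod]
          simp only [hget2]
          rw [← hshape]
          simp [hv]
        rw [List.map_cons, List.foldl_cons, hstep, ih (pre ++ [(k, v)]) (td ++ [k]) hnod']
        simp [List.append_assoc, hv]
      · have hstep : pvDecStep (PySem.Dict.mk (pvDec1 pre ++ (k, v) :: rest), td) k
            = (PySem.Dict.mk (pvDec1 (pre ++ [(k, v)]) ++ rest), td) := by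
          unfold pvDecStep
          rw [hmod]
          simp only [hget2]
          rw [← hshape]
          have : ((v - 1 : Int) == 0) = false := by simp; omega
          simp [this]
        rw [List.map_cons, List.foldl_cons, hstep, ih (pre ++ [(k, v)]) td hnod']
        have hvf : ((v : Int) == 1) = false := by simp [hv]
        simp [List.append_assoc, hvf]

-- a deletion loop over a list of keys, characterised
lemma pv_eraseLoop (td : List Int) (d : PySem.Dict Int Int) :
    (td.foldl (fun d item => d.erase item) d).items
      = d.items.filter (fun p => !(td.any (fun i => p.1 == i))) := by
  induction td generalizing d with
  | nil => simp
  | cons i t ih =>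
      simp only [List.foldl_cons]
      rw [ih]
      simp only [PySem.Dict.erase, List.filter_filter]
      apply List.filter_congr
      intro p _
      simp only [List.any_cons, Bool.not_or]
      cases h1 : (p.1 == i) <;> cases h2 : t.any (fun i => p.1 == i) <;> simp_all

-- membership in to_delete, decided by the entry's own value (keys are unique)
lemma pv_td_mem (post : List (Int × Int)) (hn : (post.map Prod.fst).Nodup)
    (p : Int × Int) (hp : p ∈ post) :
    (((post.filter (fun q => q.2 == 1)).map Prod.fst).any (fun i => p.1 == i)) = (p.2 == 1) := by
  by_cases hv : p.2 = 1
  · simp only [hv, beq_self_eq_true]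
    simp only [List.any_eq_true, List.mem_map, List.mem_filter, beq_iff_eq]
    exact ⟨p.1, ⟨p, ⟨hp, hv⟩, rfl⟩, rfl⟩
  · have hvf : (p.2 == 1) = false := by simp [hv]
    simp only [hvf]
    rw [Bool.eq_false_iff]
    intro hany
    simp only [List.any_eq_true, List.mem_map, List.mem_filter, beq_iff_eq] at hany
    obtain ⟨i, ⟨q, ⟨hq, hq1⟩, rfl⟩, he⟩ := hany
    have hnd : (PySem.Dict.mk post).keys.Nodup := by simpa [PySem.Dict.keys] using hn
    have e1 : (PySem.Dict.mk post).get? p.1 = some p.2 :=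
      PySem.Dict.get?_of_mem_items _ (by simpa using hp) hnd
    have e2 : (PySem.Dict.mk post).get? q.1 = some q.2 :=
      PySem.Dict.get?_of_mem_items _ (by simpa using hq) hnd
    rw [he] at e1
    rw [e1] at e2
    have : p.2 = q.2 := by injection e2
    exact hv (hq1 ▸ this)

-- the eviction branch of A equals the value-filter of the shifted counters
lemma pv_evict (off : Int) (D : PySem.Dict Int Int) (h : D.keys.Nodup) :
    (let st := (PySem.Dict.mk (pvMapOff off D.items)).keys.foldl pvDecStep
        (PySem.Dict.mk (pvMapOff off D.items), ([] : List Int))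
     st.2.foldl (fun d item => d.erase item) st.1)
      = PySem.Dict.mk (pvMapOff (off + 1) (D.items.filter (fun p => p.2 != off + 1))) := by
  have hn : ((pvMapOff off D.items).map Prod.fst).Nodup := by
    simpa [pvMapOff, List.map_map, Function.comp_def, PySem.Dict.keys] using h
  have hdec := pv_decLoop (pvMapOff off D.items) [] [] (by simpa using hn)
  simp only [pvDec1, List.map_nil, List.nil_append] at hdec
  have hkeys : (PySem.Dict.mk (pvMapOff off D.items)).keys = (pvMapOff off D.items).map Prod.fst := rfl
  simp only [hkeys, hdec]
  apply PySem.Dict.ext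
  rw [pv_eraseLoop]
  -- LHS: filter by to_delete membership = filter by value, then shift
  have hcongr : (List.map (fun p => (p.1, p.2 - 1)) (pvMapOff off D.items)).filter
        (fun p => !((((pvMapOff off D.items).filter (fun q => q.2 == 1)).map Prod.fst).any (fun i => p.1 == i)))
      = (List.map (fun p => (p.1, p.2 - 1)) (pvMapOff off D.items)).filter (fun p => !(p.2 == 0)) := by
    apply List.filter_congr
    intro p hp
    obtain ⟨q, hq, rfl⟩ := List.mem_map.mp hp
    have := pv_td_mem (pvMapOff off D.items) hn q hq
    simp only [this]
    congr 1
    by_cases h1 : q.2 = 1 <;> simp [h1] <;> omega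
  rw [hcongr, List.filter_map]
  have hpred : (pvMapOff off D.items).filter
        ((fun p => !(p.2 == 0)) ∘ (fun p => (p.1, p.2 - 1)))
      = (pvMapOff off D.items).filter (fun p => p.2 != 1) := by
    apply List.filter_congr
    intro p _
    simp only [Function.comp_def, bne]
    congr 1
    rw [Bool.eq_iff_iff]
    simp [Int.sub_eq_zero]
  rw [hpred]
  simp only [pvMapOff, List.filter_map]
  have hpred2 : D.items.filter ((fun p => p.2 != 1) ∘ (fun p => (p.1, p.2 - off)))
      = D.items.filter (fun p => p.2 != off + 1) := by
    apply List.filter_congr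
    intro p _
    simp only [Function.comp_def, bne]
    congr 1
    rw [Bool.eq_iff_iff]
    simp only [beq_iff_eq]
    omega
  rw [hpred2, List.map_map]
  apply List.map_congr_left
  intro p _
  simp only [Function.comp_def, Prod.mk.injEq]
  constructor
  · trivial
  · ring

-- B's deletion loop removes exactly the entries stored at value off+1
lemma pv_evictB (counts : PySem.Dict Int Int) (buckets : PySem.Dict Int (PySem.Set Int)) (off : Int)
    (hI : pvInv counts buckets off) :
    ((buckets.getD (off + 1) PySem.Set.empty).foldl (fun d y => d.erase y) counts).items
      = counts.items.filter (fun p => p.2 != off + 1) := by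
  obtain ⟨hnd, _, hB⟩ := hI
  rw [pv_eraseLoop]
  apply List.filter_congr
  intro p hp
  have hget : counts.get? p.1 = some p.2 :=
    PySem.Dict.get?_of_mem_items _ hp hnd
  have hmem : (p.1 ∈ buckets.getD (off + 1) PySem.Set.empty) ↔ p.2 = off + 1 := by
    rw [hB (off + 1) (by omega) p.1, hget]
    constructor
    · intro h; injection h
    · intro h; rw [h]
  rw [Bool.eq_iff_iff]
  simp only [Bool.not_eq_true', List.any_eq_false, beq_iff_eq, bne_iff_ne, ne_eq]
  constructor
  · intro h hv
    exact h p.1 (hmem.mpr hv) rfl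
  · intro h i hi he
    exact h (hmem.mp (he ▸ hi))

-- one loop step: the simulation (A's dict is B's counts shifted by the offset) and the
-- invariant are both preserved
lemma pv_step (c : PySem.Dict Int Int) (b : PySem.Dict Int (PySem.Set Int)) (off : Int) (x : Int)
    (hI : pvInv c b off) :
    pvStepA (PySem.Dict.mk (pvMapOff off c.items)) x
      = PySem.Dict.mk (pvMapOff (pvStepB (c, b, off) x).2.2 (pvStepB (c, b, off) x).1.items)
    ∧ pvInv (pvStepB (c, b, off) x).1 (pvStepB (c, b, off) x).2.1 (pvStepB (c, b, off) x).2.2 := by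
  obtain ⟨hnd, hV, hB⟩ := hI
  have hsz : (PySem.Dict.mk (pvMapOff off c.items)).size = c.size := pv_size_mapOff off c.items
  by_cases hc : c.contains x = true
  · -- increment branch
    obtain ⟨v, hg⟩ : ∃ v, c.get? x = some v := by
      rw [PySem.Dict.contains_eq_isSome_get?] at hc
      exact Option.isSome_iff_exists.mp hc
    have hvD : c.getD x 0 = v := by rw [PySem.Dict.getD_eq_get?_getD, hg]; rfl
    have hoffv : off < v := hV x v hg
    constructor
    · simp only [pvStepA, pvStepB, pv_contains_mapOff, hc, if_true]
      rw [pv_modify_mapOff off c.items x hc]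
      rfl
    · simp only [pvStepB, hc, if_true]
      refine ⟨PySem.Dict.nodup_keys_insert _ _ _ hnd, ?_, ?_⟩
      · intro y w hgw
        rw [PySem.Dict.get?_insert] at hgw
        by_cases hy : y = x
        · rw [if_pos hy] at hgw
          have hw := Option.some.inj hgw
          omega
        · rw [if_neg hy] at hgw
          exact hV y w hgw
      · intro v0 hv0 y
        rw [PySem.Dict.getD_modify, PySem.Dict.getD_modify, PySem.Dict.get?_insert, hvD]
        by_cases h1 : v0 = v + 1
        · rw [if_pos h1, if_neg (show ¬ (v + 1 = v) by omega), PySem.Set.mem_add,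
            hB (v + 1) (by omega) y, h1]
          by_cases hy : y = x
          · subst hy
            rw [if_pos rfl]
            exact ⟨fun _ => rfl, fun _ => Or.inr rfl⟩
          · rw [if_neg hy]
            simp [hy]
        · rw [if_neg h1, PySem.Dict.getD_modify]
          by_cases h2 : v0 = v
          · rw [if_pos h2, PySem.Set.mem_discard, hB v hoffv y, h2]
            by_cases hy : y = x
            · subst hy
              rw [if_pos rfl]
              constructor
              · rintro ⟨_, hne⟩
                exact absurd rfl hne
              · intro hcontra
                exfalso
                have := Option.some.inj hcontra
                omega
            · rw [if_neg hy]
              simp [hy]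
          · rw [if_neg h2, hB v0 hv0 y]
            by_cases hy : y = x
            · subst hy
              rw [if_pos rfl, hg]
              constructor
              · intro hcontra
                exact absurd (Option.some.inj hcontra).symm h2
              · intro hcontra
                exact absurd (Option.some.inj hcontra).symm h1
            · rw [if_neg hy]
  · have hc' : c.contains x = false := by simpa using hc
    have hgx : c.get? x = none := by
      rw [PySem.Dict.get?_eq_none_iff_contains]; exact hc'
    by_cases hs : (c.size : Int) < 999
    · -- fresh-insert branch
      constructor
      · simp only [pvStepA, pvStepB, pv_contains_mapOff, hc', Bool.false_eq_true, if_false,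
          hsz, hs, if_true]
        exact pv_insert_mapOff off c.items x hc'
      · simp only [pvStepB, hc', Bool.false_eq_true, if_false, hs, if_true]
        refine ⟨PySem.Dict.nodup_keys_insert _ _ _ hnd, ?_, ?_⟩
        · intro y w hgw
          rw [PySem.Dict.get?_insert] at hgw
          by_cases hy : y = x
          · rw [if_pos hy] at hgw
            have hw := Option.some.inj hgw
            omega
          · rw [if_neg hy] at hgw
            exact hV y w hgw
        · intro v0 hv0 y
          rw [PySem.Dict.getD_modify, PySem.Dict.get?_insert]
          by_cases h1 : v0 = off + 1
          · rw [if_pos h1, PySem.Set.mem_add, hB (off + 1) (by omega) y, h1]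
            by_cases hy : y = x
            · subst hy
              rw [if_pos rfl]
              exact ⟨fun _ => rfl, fun _ => Or.inr rfl⟩
            · rw [if_neg hy]
              simp [hy]
          · rw [if_neg h1, hB v0 hv0 y]
            by_cases hy : y = x
            · subst hy
              rw [if_pos rfl, hgx]
              constructor
              · intro hcontra
                exact absurd hcontra (by simp)
              · intro hcontra
                exact absurd (Option.some.inj hcontra).symm h1
            · rw [if_neg hy]
    · -- eviction branch
      have hfilter := pv_evictB c b off ⟨hnd, hV, hB⟩
      constructor
      · simp only [pvStepA, pvStepB, pv_contains_mapOff, hc', Bool.false_eq_true, if_false,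
          hsz, hs, if_false]
        rw [pv_evict off c hnd]
        apply PySem.Dict.ext
        simp only [hfilter]
      · simp only [pvStepB, hc', Bool.false_eq_true, if_false, hs, if_false]
        have hndc : ((b.getD (off + 1) PySem.Set.empty).foldl (fun d y => d.erase y) c).keys.Nodup := by
          have hk : ((b.getD (off + 1) PySem.Set.empty).foldl (fun d y => d.erase y) c).keys
              = (c.items.filter (fun p => p.2 != off + 1)).map Prod.fst := by
            simp only [PySem.Dict.keys, hfilter]
          rw [hk]
          exact List.Nodup.sublist ((List.filter_sublist).map Prod.fst) hnd
        have hchar : ∀ y w,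
            ((b.getD (off + 1) PySem.Set.empty).foldl (fun d y => d.erase y) c).get? y = some w
              ↔ c.get? y = some w ∧ w ≠ off + 1 := by
          intro y w
          rw [PySem.Dict.get?_eq_some_iff_mem_items _ _ _ hndc]
          have hmem : ((y, w) ∈ ((b.getD (off + 1) PySem.Set.empty).foldl (fun d y => d.erase y) c).items)
              ↔ (y, w) ∈ c.items.filter (fun p => p.2 != off + 1) := by
            rw [hfilter]
          rw [hmem, List.mem_filter]
          rw [← PySem.Dict.get?_eq_some_iff_mem_items _ _ _ hnd]
          simp [bne_iff_ne]
        refine ⟨hndc, ?_, ?_⟩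
        · intro y w hgw
          rw [hchar] at hgw
          have h1 := hV y w hgw.1
          have h2 := hgw.2
          omega
        · intro v0 hv0 y
          rw [pv_getD_erase_of_ne _ _ _ (by omega), hchar, hB v0 (by omega) y]
          constructor
          · intro h
            exact ⟨h, by omega⟩
          · rintro ⟨h, _⟩
            exact h

-- the whole loop preserves the simulation
lemma pv_loop (s : List Int) (c : PySem.Dict Int Int) (b : PySem.Dict Int (PySem.Set Int)) (off : Int)
    (hI : pvInv c b off) :
    s.foldl pvStepA (PySem.Dict.mk (pvMapOff off c.items))
      = PySem.Dict.mk (pvMapOff (s.foldl pvStepB (c, b, off)).2.2 (s.foldl pvStepB (c, b, off)).1.items) := by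
  induction s generalizing c b off with
  | nil => rfl
  | cons x t ih =>
      obtain ⟨h1, h2⟩ := pv_step c b off x hI
      simp only [List.foldl_cons, h1]
      have := ih (pvStepB (c, b, off) x).1 (pvStepB (c, b, off) x).2.1 (pvStepB (c, b, off) x).2.2 h2
      simpa using this

-- ===== VERDICT (by name: the statement is the Claim_ definition above) =====
theorem find_point_one_percent_hitters_spec : Claim_equal_find_point_one_percent_hitters := by
  intro stream _
  unfold Spec_find_point_one_percent_hitters
  unfold find_point_one_percent_hitters find_point_one_percent_hitters_alt
  have hI0 : pvInv PySem.Dict.empty PySem.Dict.empty 0 := by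
    refine ⟨by simp [PySem.Dict.empty, PySem.Dict.keys], ?_, ?_⟩
    · intro x v h
      simp [PySem.Dict.empty, PySem.Dict.get?] at h
    · intro v _ y
      simp [PySem.Dict.empty, PySem.Dict.getD_eq_get?_getD, PySem.Dict.get?, PySem.Set.empty]
  have h0 : (PySem.Dict.empty : PySem.Dict Int Int)
      = PySem.Dict.mk (pvMapOff 0 (PySem.Dict.empty : PySem.Dict Int Int).items) := by
    simp [PySem.Dict.empty, pvMapOff]
  rw [show (stream.foldl pvStepA PySem.Dict.empty)
        = stream.foldl pvStepA (PySem.Dict.mk (pvMapOff 0 (PySem.Dict.empty : PySem.Dict Int Int).items)) from by rw [← h0]]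
  rw [pv_loop stream PySem.Dict.empty PySem.Dict.empty 0 hI0]
  simp [pvMapOff]
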